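-- pv_equiv track=rewrite | github.com/Makspk337/LAB7 | Python3.py | can_fill_rope
-- ===== SOURCE A (Python) =====
-- def can_fill_rope(items, used, index, current_sum, total_length):
--     if index == len(items):
--         return current_sum == total_length
--
--     for i in range(len(items)):
--         if not used[i]:
--             used[i] = True
--             if can_fill_rope(items, used, index + 1, current_sum + items[i], total_length):
--                 return True
--             used[i] = False
--
--     return False
-- ===== SOURCE B (Python) =====
-- def can_fill_rope(items, used, index, current_sum, total_length):
--     if index == len(items):
--         return current_sum == total_length
--     free = [items[i] for i in range(len(items)) if not used[i]]
--     return _choose(free, len(items) - index, total_length - current_sum)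
--
--
-- def _choose(free, k, target):
--     # is there a size-k subset of free summing to target?
--     if k <= 0:
--         return k == 0 and target == 0
--     if len(free) < k:
--         return False
--     return _choose(free[1:], k - 1, target - free[0]) or _choose(free[1:], k, target)
-- ===== Notes on version B (the rewrite author's own statement) =====
-- stated objective: alternative
-- what changed: Replaces the mutating permutation backtracking (which re-tries every ordering of the chosen items) with a non-mutating take-or-skip subset recursion over the list of unused items, so only subsets, not orderings, are explored.
-- outside the precondition, e.g. on can_fill_rope([1, 2], [False], 1, 0, 1): A returns True, B raises IndexError
import Mathlib
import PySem

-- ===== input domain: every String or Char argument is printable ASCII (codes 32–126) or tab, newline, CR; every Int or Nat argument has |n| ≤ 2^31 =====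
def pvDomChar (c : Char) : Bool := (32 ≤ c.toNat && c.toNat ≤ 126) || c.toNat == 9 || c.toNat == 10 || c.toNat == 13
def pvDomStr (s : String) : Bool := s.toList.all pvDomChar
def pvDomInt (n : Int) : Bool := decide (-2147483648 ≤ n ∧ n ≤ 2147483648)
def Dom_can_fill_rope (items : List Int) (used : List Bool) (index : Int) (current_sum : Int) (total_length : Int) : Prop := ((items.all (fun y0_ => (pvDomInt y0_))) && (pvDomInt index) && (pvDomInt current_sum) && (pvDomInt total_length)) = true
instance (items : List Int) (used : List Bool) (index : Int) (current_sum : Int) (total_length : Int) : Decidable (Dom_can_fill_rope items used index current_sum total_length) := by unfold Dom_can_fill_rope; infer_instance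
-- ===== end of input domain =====

-- B replaces A's mutating permutation backtracking by a take-or-skip subset recursion over
-- the unused items (objective: alternative — subsets instead of orderings). Python A mutates
-- `used` in place (entries stay True when it returns True); the equivalence proved here is
-- about the RETURN value only — B does not mutate.

-- ===== PORT A =====
-- termination helper for the port (cited by name in decreasing_by)
theorem pv_count_set_lt (used : List Bool) (i : Nat) (h : used.getD i true = false) :
    (used.set i true).count false < used.count false := by
  induction used generalizing i with
  | nil => simp [List.getD] at h
  | cons b bs ih =>
    cases i with
    | zero => simp_all [List.count_cons]
    | succ j =>
      have := ih j (by simpa [List.getD] using h)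
      simp only [List.set, List.count_cons]
      omega

mutual
-- literal port of A; `used[i]` is ported as getD (Python raises out of range: Pre_ excludes that)
def can_fill_rope (items : List Int) (used : List Bool) (index : Int) (current_sum : Int) (total_length : Int) : Bool :=
  if index = (items.length : Int) then current_sum == total_length
  else pvLoopA items used index current_sum total_length 0
termination_by (used.count false, items.length + 1)
decreasing_by exact Prod.Lex.right _ (by omega)

-- the `for i in range(len(items))` loop of A (backtracking: on failure `used` is restored,
-- so the next iteration runs with the same `used`)
def pvLoopA (items : List Int) (used : List Bool) (index : Int) (current_sum : Int) (total_length : Int) (i : Nat) : Bool :=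
  if h : i < items.length then
    if hu : used.getD i true = false then
      if can_fill_rope items (used.set i true) (index + 1) (current_sum + items.getD i 0) total_length then true
      else pvLoopA items used index current_sum total_length (i + 1)
    else pvLoopA items used index current_sum total_length (i + 1)
  else false
termination_by (used.count false, items.length - i)
decreasing_by
  · exact Prod.Lex.left _ _ (pv_count_set_lt used i hu)
  · exact Prod.Lex.right _ (by omega)
  · exact Prod.Lex.right _ (by omega)
end

-- ===== PORT B =====
-- port of Source B's _choose: is there a size-k subset of `free` summing to `target`?
def pvChoose (free : List Int) (k : Int) (target : Int) : Bool :=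
  if k ≤ 0 then k == 0 && target == 0
  else if (free.length : Int) < k then false
  else
    match free with
    | [] => false
    | x :: rest => pvChoose rest (k - 1) (target - x) || pvChoose rest k target
termination_by free.length

def can_fill_rope_alt (items : List Int) (used : List Bool) (index : Int) (current_sum : Int) (total_length : Int) : Bool :=
  if index = (items.length : Int) then current_sum == total_length
  else
    -- [items[i] for i in range(len(items)) if not used[i]]  (indexing total via getD; Pre_ keeps it in range)
    let free := (List.range items.length).filterMap
      (fun i => if used.getD i true = false then some (items.getD i 0) else none)
    pvChoose free ((items.length : Int) - index) (total_length - current_sum)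

-- ===== PRECONDITION & SPEC =====
-- Pre_ excludes inputs with len(used) < len(items) and index ≠ len(items): there Python A
-- indexes `used` out of range and raises IndexError unless the search happens to succeed at
-- an early index, and B's comprehension raises IndexError on all of them.
def Pre_can_fill_rope (items : List Int) (used : List Bool) (index : Int) (current_sum : Int) (total_length : Int) : Prop :=
  index = (items.length : Int) ∨ items.length ≤ used.length
instance (items : List Int) (used : List Bool) (index : Int) (current_sum : Int) (total_length : Int) : Decidable (Pre_can_fill_rope items used index current_sum total_length) := by unfold Pre_can_fill_rope; infer_instance

def pvWitness_can_fill_rope : List Int × List Bool × Int × Int × Int := ([1, 2], [false, false], 0, 0, 3)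

def Spec_can_fill_rope (items : List Int) (used : List Bool) (index : Int) (current_sum : Int) (total_length : Int) (out : Bool) : Prop := out = can_fill_rope_alt items used index current_sum total_length
instance (items : List Int) (used : List Bool) (index : Int) (current_sum : Int) (total_length : Int) (out : Bool) : Decidable (Spec_can_fill_rope items used index current_sum total_length out) := by unfold Spec_can_fill_rope; infer_instance

-- ===== CLAIM (what is proved, stated in full; the proofs are below) =====
def Claim_equal_can_fill_rope : Prop := ∀ (items : List Int) (used : List Bool) (index : Int) (current_sum : Int) (total_length : Int), Dom_can_fill_rope items used index current_sum total_length → Pre_can_fill_rope items used index current_sum total_length → Spec_can_fill_rope items used index current_sum total_length (can_fill_rope items used index current_sum total_length)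

-- ===== LEMMAS AND PROOFS =====

def pvFree : List Int → List Bool → List Int
  | [], _ => []
  | _ :: _, [] => []
  | x :: xs, b :: bs => if b then pvFree xs bs else x :: pvFree xs bs

theorem pvFree_eq_filterMap (items : List Int) (used : List Bool) :
    (List.range items.length).filterMap
      (fun i => if used.getD i true = false then some (items.getD i 0) else none)
    = pvFree items used := by
  induction items generalizing used with
  | nil => simp [pvFree]
  | cons x xs ih =>
    cases used with
    | nil =>
      simp only [List.length_cons, List.range_succ_eq_map, List.filterMap_cons,
        List.filterMap_map, pvFree]
      simp [List.getD]
    | cons b bs =>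
      simp only [List.length_cons, List.range_succ_eq_map, List.filterMap_cons,
        List.filterMap_map, pvFree]
      have hcomp : ((fun i => if (b :: bs).getD i true = false then some ((x :: xs).getD i 0) else none) ∘ Nat.succ)
          = (fun i => if bs.getD i true = false then some (xs.getD i 0) else none) := by
        funext i; simp [List.getD]
      rw [hcomp, ih bs]
      cases b <;> simp [List.getD]

theorem pv_pos_of_getD_false (used : List Bool) (j : Nat) (h : used.getD j true = false) :
    0 < used.count false := by
  induction used generalizing j with
  | nil => simp [List.getD] at h
  | cons b bs ih =>
    cases j with
    | zero => simp_all [List.count_cons]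
    | succ i =>
      have := ih i (by simpa [List.getD] using h)
      rw [List.count_cons]; omega

theorem pvFree_of_count_zero (items : List Int) (used : List Bool) (h : used.count false = 0) :
    pvFree items used = [] := by
  induction items generalizing used with
  | nil => simp [pvFree]
  | cons x xs ih =>
    cases used with
    | nil => simp [pvFree]
    | cons b bs =>
      simp only [List.count_cons] at h
      cases b
      · simp at h
      · simp only [pvFree, if_pos rfl]
        exact ih bs (by omega)

theorem pvFree_split (items : List Int) (used : List Bool) (j : Nat)
    (hj : j < items.length) (hu : used.getD j true = false) :
    ∃ P Q, pvFree items used = P ++ items.getD j 0 :: Q ∧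
           pvFree items (used.set j true) = P ++ Q := by
  induction items generalizing used j with
  | nil => simp at hj
  | cons x xs ih =>
    cases used with
    | nil => simp [List.getD] at hu
    | cons b bs =>
      cases j with
      | zero =>
        simp only [List.getD] at hu
        subst hu
        exact ⟨[], pvFree xs bs, by simp [pvFree, List.getD], by simp [pvFree, List.set]⟩
      | succ i =>
        have hu' : bs.getD i true = false := by simpa [List.getD] using hu
        obtain ⟨P, Q, h1, h2⟩ := ih bs i (by simpa using hj) hu'
        cases b with
        | true =>
          exact ⟨P, Q, by simpa [pvFree, List.getD] using h1,
            by simpa [pvFree, List.set] using h2⟩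
        | false =>
          exact ⟨x :: P, Q, by simpa [pvFree, List.getD] using h1,
            by simpa [pvFree, List.set] using h2⟩

theorem pvFree_pick (items : List Int) (used : List Bool) (x : Int) (m : List Int)
    (h : (x :: m).Sublist (pvFree items used)) :
    ∃ j, j < items.length ∧ used.getD j true = false ∧ items.getD j 0 = x ∧
         m.Sublist (pvFree items (used.set j true)) := by
  induction items generalizing used x m with
  | nil => simp [pvFree, List.sublist_nil] at h
  | cons y xs ih =>
    cases used with
    | nil => simp [pvFree, List.sublist_nil] at h
    | cons b bs =>
      cases b with
      | true =>
        simp only [pvFree] at h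
        obtain ⟨j, h1, h2, h3, h4⟩ := ih bs x m h
        exact ⟨j + 1, by simpa using h1, by simpa [List.getD] using h2,
          by simpa [List.getD] using h3, by simpa [pvFree, List.set] using h4⟩
      | false =>
        simp only [pvFree] at h
        cases h with
        | cons _ h' =>
          obtain ⟨j, h1, h2, h3, h4⟩ := ih bs x m h'
          refine ⟨j + 1, by simpa using h1, by simpa [List.getD] using h2,
            by simpa [List.getD] using h3, ?_⟩
          have : pvFree (y :: xs) ((false :: bs).set (j+1) true) = y :: pvFree xs (bs.set j true) := by
            simp [pvFree, List.set]
          rw [this]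
          exact h4.cons y
        | cons₂ _ h' =>
          exact ⟨0, by simp, by simp [List.getD], by simp [List.getD], by
            simpa [pvFree, List.set] using h'⟩

theorem pvLoopA_iff_aux (items : List Int) (used : List Bool) (index cs tl : Int) :
    ∀ (k i : Nat), items.length ≤ i + k →
    (pvLoopA items used index cs tl i = true ↔
      ∃ j, i ≤ j ∧ j < items.length ∧ used.getD j true = false ∧
        can_fill_rope items (used.set j true) (index + 1) (cs + items.getD j 0) tl = true) := by
  intro k
  induction k with
  | zero =>
    intro i hi
    rw [pvLoopA, dif_neg (by omega)]
    constructor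
    · intro hfalse; exact absurd hfalse (by simp)
    · rintro ⟨j, h1, h2, -, -⟩; omega
  | succ k ih =>
    intro i hi
    rw [pvLoopA]
    by_cases h : i < items.length
    · rw [dif_pos h]
      by_cases hu : used.getD i true = false
      · rw [dif_pos hu]
        by_cases hr : can_fill_rope items (used.set i true) (index + 1) (cs + items.getD i 0) tl = true
        · rw [if_pos hr]
          exact iff_of_true rfl ⟨i, le_rfl, h, hu, hr⟩
        · rw [if_neg hr, ih (i + 1) (by omega)]
          constructor
          · rintro ⟨j, h1, h2, h3, h4⟩; exact ⟨j, by omega, h2, h3, h4⟩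
          · rintro ⟨j, h1, h2, h3, h4⟩
            rcases Nat.eq_or_lt_of_le h1 with rfl | h1'
            · exact absurd h4 hr
            · exact ⟨j, by omega, h2, h3, h4⟩
      · rw [dif_neg hu, ih (i + 1) (by omega)]
        constructor
        · rintro ⟨j, h1, h2, h3, h4⟩; exact ⟨j, by omega, h2, h3, h4⟩
        · rintro ⟨j, h1, h2, h3, h4⟩
          rcases Nat.eq_or_lt_of_le h1 with rfl | h1'
          · exact absurd h3 hu
          · exact ⟨j, by omega, h2, h3, h4⟩
    · rw [dif_neg h]
      constructor
      · intro hfalse; exact absurd hfalse (by simp)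
      · rintro ⟨j, h1, h2, -, -⟩; omega

theorem pvLoopA_iff (items : List Int) (used : List Bool) (index cs tl : Int) :
    pvLoopA items used index cs tl 0 = true ↔
      ∃ j, j < items.length ∧ used.getD j true = false ∧
        can_fill_rope items (used.set j true) (index + 1) (cs + items.getD j 0) tl = true := by
  rw [pvLoopA_iff_aux items used index cs tl items.length 0 (by omega)]
  exact ⟨fun ⟨j, _, h2, h3, h4⟩ => ⟨j, h2, h3, h4⟩, fun ⟨j, h2, h3, h4⟩ => ⟨j, Nat.zero_le j, h2, h3, h4⟩⟩

theorem pvChoose_iff (free : List Int) : ∀ (k t : Int),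
    (pvChoose free k t = true ↔
      ∃ l : List Int, l.Sublist free ∧ (l.length : Int) = k ∧ l.sum = t) := by
  induction free with
  | nil =>
    intro k t
    rw [pvChoose]
    by_cases hk : k ≤ 0
    · rw [if_pos hk]
      simp only [Bool.and_eq_true, beq_iff_eq, List.sublist_nil]
      constructor
      · rintro ⟨rfl, rfl⟩; exact ⟨[], rfl, by simp, by simp⟩
      · rintro ⟨l, rfl, h2, h3⟩; simp at h2 h3; exact ⟨h2.symm, h3.symm⟩
    · rw [if_neg hk, if_pos (by simp; omega)]
      constructor
      · intro hfalse; exact absurd hfalse (by simp)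
      · rintro ⟨l, hl, h2, -⟩
        rw [List.sublist_nil.mp hl] at h2; simp at h2; omega
  | cons x rest ih =>
    intro k t
    rw [pvChoose]
    by_cases hk : k ≤ 0
    · rw [if_pos hk]
      simp only [Bool.and_eq_true, beq_iff_eq]
      constructor
      · rintro ⟨rfl, rfl⟩; exact ⟨[], List.nil_sublist _, by simp, by simp⟩
      · rintro ⟨l, -, h2, h3⟩
        have : l = [] := List.length_eq_zero_iff.mp (by omega)
        subst this; simp at h2 h3; exact ⟨h2.symm, h3.symm⟩
    · rw [if_neg hk]
      by_cases hlen : ((x :: rest).length : Int) < k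
      · rw [if_pos hlen]
        constructor
        · intro hfalse; exact absurd hfalse (by simp)
        · rintro ⟨l, hl, h2, -⟩
          have := hl.length_le
          omega
      · rw [if_neg hlen]
        simp only [Bool.or_eq_true, ih (k - 1) (t - x), ih k t]
        constructor
        · rintro (⟨l, hl, h2, h3⟩ | ⟨l, hl, h2, h3⟩)
          · exact ⟨x :: l, hl.cons₂ x, by simp only [List.length_cons]; push_cast; omega, by simp; omega⟩
          · exact ⟨l, hl.cons x, h2, h3⟩
        · rintro ⟨l, hl, h2, h3⟩
          cases hl with
          | cons _ hl' => exact Or.inr ⟨l, hl', h2, h3⟩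
          | cons₂ _ hl' =>
            rename_i m
            exact Or.inl ⟨m, hl', by simp only [List.length_cons] at h2; push_cast at h2 ⊢; omega, by simp at h3; omega⟩

theorem pv_end_iff (items : List Int) (used : List Bool) (index cs tl : Int)
    (h : index = (items.length : Int)) :
    ((cs == tl) = true ↔
      ∃ l : List Int, l.Sublist (pvFree items used) ∧ (l.length : Int) = (items.length : Int) - index ∧
        cs + l.sum = tl) := by
  simp only [beq_iff_eq]
  constructor
  · rintro rfl; exact ⟨[], List.nil_sublist _, by simp [h], by simp⟩
  · rintro ⟨l, -, h2, h3⟩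
    have : l = [] := List.length_eq_zero_iff.mp (by omega)
    subst this; simpa using h3

theorem can_fill_rope_iff (μ : Nat) (items : List Int) :
    ∀ (used : List Bool) (index cs tl : Int), used.count false ≤ μ →
    (can_fill_rope items used index cs tl = true ↔
      ∃ l : List Int, l.Sublist (pvFree items used) ∧ (l.length : Int) = (items.length : Int) - index ∧
        cs + l.sum = tl) := by
  induction μ with
  | zero =>
    intro used index cs tl hμ
    rw [can_fill_rope]
    by_cases h : index = (items.length : Int)
    · rw [if_pos h]; exact pv_end_iff items used index cs tl h
    · rw [if_neg h, pvLoopA_iff]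
      constructor
      · rintro ⟨j, -, hu, -⟩
        exact absurd (pv_pos_of_getD_false used j hu) (by omega)
      · rintro ⟨l, hl, hlen, -⟩
        rw [pvFree_of_count_zero items used (by omega)] at hl
        rw [List.sublist_nil.mp hl] at hlen
        simp at hlen; exact absurd (show index = (items.length : Int) by omega) h
  | succ μ ih =>
    intro used index cs tl hμ
    rw [can_fill_rope]
    by_cases h : index = (items.length : Int)
    · rw [if_pos h]; exact pv_end_iff items used index cs tl h
    · rw [if_neg h, pvLoopA_iff]
      constructor
      · rintro ⟨j, hj, hu, hr⟩
        have hc : (used.set j true).count false ≤ μ := by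
          have := pv_count_set_lt used j hu; omega
        rw [ih _ _ _ _ hc] at hr
        obtain ⟨l, hl, hlen, hsum⟩ := hr
        obtain ⟨P, Q, hPQ1, hPQ2⟩ := pvFree_split items used j hj hu
        rw [hPQ2] at hl
        obtain ⟨l₁, l₂, rfl, h1, h2⟩ := List.sublist_append_iff.mp hl
        refine ⟨l₁ ++ items.getD j 0 :: l₂, ?_, ?_, ?_⟩
        · rw [hPQ1]; exact h1.append (h2.cons₂ _)
        · simp only [List.length_append, List.length_cons] at hlen ⊢
          push_cast at hlen ⊢; omega
        · simp only [List.sum_append, List.sum_cons] at hsum ⊢; omega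
      · rintro ⟨l, hl, hlen, hsum⟩
        match l, hl, hlen, hsum with
        | [], _, hlen, _ => simp at hlen; exact absurd (show index = (items.length : Int) by omega) h
        | x :: m, hl, hlen, hsum =>
          obtain ⟨j, hj, hu, hx, hm⟩ := pvFree_pick items used x m hl
          have hc : (used.set j true).count false ≤ μ := by
            have := pv_count_set_lt used j hu; omega
          refine ⟨j, hj, hu, ?_⟩
          rw [ih _ _ _ _ hc]
          refine ⟨m, hm, by simp only [List.length_cons] at hlen; push_cast at hlen ⊢; omega, ?_⟩
          rw [hx]
          simp only [List.sum_cons] at hsum; omega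

-- ===== VERDICT (by name: the statement is the Claim_ definition above) =====
theorem can_fill_rope_spec : Claim_equal_can_fill_rope := by
  intro items used index cs tl _ _
  unfold Spec_can_fill_rope can_fill_rope_alt
  rw [Bool.eq_iff_iff]
  rw [can_fill_rope_iff (used.count false) items used index cs tl le_rfl]
  split_ifs with h
  · subst h
    simp only [beq_iff_eq]
    constructor
    · rintro ⟨l, -, hl, hs⟩
      have : l = [] := List.length_eq_zero_iff.mp (by omega)
      subst this; simpa using hs
    · intro he; exact ⟨[], List.nil_sublist _, by simp, by simpa using he⟩
  · rw [pvChoose_iff, pvFree_eq_filterMap]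
    constructor
    · rintro ⟨l, h1, h2, h3⟩; exact ⟨l, h1, h2, by omega⟩
    · rintro ⟨l, h1, h2, h3⟩; exact ⟨l, h1, h2, by omega⟩
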